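-- pv_equiv track=rewrite | github.com/jesopo/scpl | scpl/common.py | with_delimiter
-- ===== SOURCE A (Python) =====
-- from typing      import Iterator, List, Optional, Sequence
--
-- def find_unescaped(
--         s: str,
--         c: str
--         ) -> Iterator[int]:
--
--     i = 0
--
--     while i < len(s):
--         c2 = s[i]
--         if c2 == "\\":
--             i += 1
--         elif c2 == c:
--             yield i
--         i += 1
--
-- def find_unused_delimiter(
--         s:     str,
--         chars: Sequence[str]
--         ) -> Optional[str]:
--
--     for char in chars:
--         try:
--             next(find_unescaped(s, char))
--         except StopIteration:
--             return char
--     else: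
--         return None
--
-- def with_delimiter(
--         s:     str,
--         chars: Sequence[str]
--         ) -> str:
--
--     if unused_delim := find_unused_delimiter(s, chars):
--         delim = unused_delim
--     else:
--         delim  = chars[0]
--         found  = find_unescaped(s, delim)
--         rdelim = f"\\{delim}"
--         for index in reversed(list(found)):
--             s = s[:index] + rdelim + s[index+1:]
--
--     return f"{delim}{s}{delim}"
-- ===== SOURCE B (Python) =====
-- def with_delimiter(s, chars):
--     # One forward pass: collect the set of characters occurring UNESCAPED in s
--     # (a backslash consumes the following character).
--     unescaped = set()
--     i = 0
--     n = len(s)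
--     while i < n:
--         if s[i] == "\\":
--             i += 2
--         else:
--             unescaped.add(s[i])
--             i += 1
--     # First candidate with no unescaped occurrence (multi-char/empty candidates
--     # can never occur as a single unescaped character, so they qualify).
--     delim = None
--     for ch in chars:
--         if ch not in unescaped:
--             delim = ch
--             break
--     if not delim:  # no unused candidate, or the unused one is the empty string
--         delim = chars[0]
--         out = []
--         i = 0
--         while i < n:
--             c = s[i]
--             if c == "\\":
--                 out.append(s[i:i+2])
--                 i += 2
--             elif c == delim:
--                 out.append("\\" + delim)
--                 i += 1
--             else:
--                 out.append(c)
--                 i += 1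
--         s = "".join(out)
--     return delim + s + delim
-- ===== Notes on version B (the rewrite author's own statement) =====
-- stated objective: alternative
-- what changed: B replaces A's per-candidate rescans of s and its repeated right-to-left string splicing by one escape-aware pass collecting the set of unescaped characters, a set lookup per candidate, and one rebuilding pass emitting the escaped string directly.
import Mathlib
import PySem

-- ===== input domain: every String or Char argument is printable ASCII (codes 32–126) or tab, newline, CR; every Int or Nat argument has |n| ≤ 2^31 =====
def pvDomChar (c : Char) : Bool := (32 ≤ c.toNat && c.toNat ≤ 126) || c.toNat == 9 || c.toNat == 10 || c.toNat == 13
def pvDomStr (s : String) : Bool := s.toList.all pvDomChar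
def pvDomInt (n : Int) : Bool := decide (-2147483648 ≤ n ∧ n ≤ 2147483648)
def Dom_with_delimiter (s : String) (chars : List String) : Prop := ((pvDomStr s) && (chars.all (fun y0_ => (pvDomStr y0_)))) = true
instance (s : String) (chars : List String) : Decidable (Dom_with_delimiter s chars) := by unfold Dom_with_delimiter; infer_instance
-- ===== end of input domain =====

-- B replaces A's per-candidate rescan of s and its repeated right-to-left string splicing by ONE
-- pass collecting the set of unescaped characters plus ONE rebuilding pass (objective: alternative).
-- Mutation note: A rebinds its local `s` only; no caller-visible mutation in either program.

-- ===== PORT A =====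
-- find_unescaped(s, c), materialised as the list of yielded indices (the generator is only ever
-- consumed as "first element or nothing" / "full list", so the eager list is exact)
def fuA (c : List Char) : List Char → Nat → List Nat
  | [], _ => []
  | c2 :: rest, i =>
    if c2 = '\\' then
      -- i += 1 skips the escaped character; if the '\' is last, the loop just ends
      match rest with
      | [] => []
      | _ :: rest' => fuA c rest' (i + 2)
    else if [c2] = c then i :: fuA c rest (i + 1)
    else fuA c rest (i + 1)

-- find_unused_delimiter: first char whose find_unescaped yields nothing, else None
def fudA (sl : List Char) : List String → Option String
  | [] => none
  | ch :: rest => if fuA ch.toList sl 0 = [] then some ch else fudA sl rest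

-- the else-branch: delim = chars[0] (IndexError on chars = [] excluded by Pre_), then
-- s = s[:index] + "\delim" + s[index+1:] for index over reversed(list(found))
def fbA (s : String) (chars : List String) : String :=
  let d := ((PySem.List.pyGet? chars 0).getD "").toList
  let found := fuA d s.toList 0
  let sl := found.reverse.foldl
    (fun t (idx : Nat) => PySem.List.slice t none (some ((idx : Nat) : Int)) ++ ('\\' :: d)
      ++ PySem.List.slice t (some (((idx : Nat) : Int) + 1)) none) s.toList
  String.ofList (d ++ sl ++ d)

def with_delimiter (s : String) (chars : List String) : String :=
  match fudA s.toList chars with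
  | some d => if d.toList = [] then fbA s chars else String.ofList (d.toList ++ s.toList ++ d.toList)
  | none => fbA s chars

-- ===== PORT B =====
-- one pass: the set of characters occurring unescaped in s
def usetB : List Char → PySem.Set Char → PySem.Set Char
  | [], acc => acc
  | c :: rest, acc =>
    if c = '\\' then
      match rest with
      | [] => acc
      | _ :: rest' => usetB rest' acc
    else usetB rest (PySem.Set.add acc c)

-- `ch not in unescaped`: only single-character candidates can be members
def membB (us : PySem.Set Char) (ch : String) : Bool :=
  match ch.toList with
  | [c] => PySem.Set.contains us c
  | _ => false

-- first candidate not in the set (the for/break loop)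
def findB (us : PySem.Set Char) : List String → Option String
  | [] => none
  | ch :: rest => if membB us ch then findB us rest else some ch

-- fallback: single rebuilding pass, copying escape pairs verbatim and escaping unescaped delims
def rebuildB (d : List Char) : List Char → List Char
  | [] => []
  | c :: rest =>
    if c = '\\' then
      -- out.append(s[i:i+2]): the escape pair verbatim (just "\\" if the backslash is last)
      match rest with
      | [] => ['\\']
      | x :: rest' => '\\' :: x :: rebuildB d rest'
    else if [c] = d then ('\\' :: d) ++ rebuildB d rest
    else c :: rebuildB d rest

def fbB (s : String) (chars : List String) : String :=
  let d := ((PySem.List.pyGet? chars 0).getD "").toList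
  String.ofList (d ++ rebuildB d s.toList ++ d)

def with_delimiter_alt (s : String) (chars : List String) : String :=
  match findB (usetB s.toList PySem.Set.empty) chars with
  | some d => if d.toList = [] then fbB s chars else String.ofList (d.toList ++ s.toList ++ d.toList)
  | none => fbB s chars

-- ===== PRECONDITION & SPEC =====
-- A raises IndexError (chars[0]) when chars = [] and no truthy unused delimiter exists; B raises
-- there too. Pre_ excludes the empty candidate list outright — the only inputs A accepts.
def Pre_with_delimiter (s : String) (chars : List String) : Prop := chars ≠ []
instance (s : String) (chars : List String) : Decidable (Pre_with_delimiter s chars) := by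
  unfold Pre_with_delimiter; infer_instance
def pvWitness_with_delimiter : String × List String := ("a\\\"b\"", ["\"", "'"])

def Spec_with_delimiter (s : String) (chars : List String) (out : String) : Prop := out = with_delimiter_alt s chars
instance (s : String) (chars : List String) (out : String) : Decidable (Spec_with_delimiter s chars out) := by unfold Spec_with_delimiter; infer_instance

-- ===== CLAIM (what is proved, stated in full; the proofs are below) =====
def Claim_equal_with_delimiter : Prop := ∀ (s : String) (chars : List String), Dom_with_delimiter s chars → Pre_with_delimiter s chars → Spec_with_delimiter s chars (with_delimiter s chars)

-- ===== LEMMAS AND PROOFS =====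

-- step equations for the three skip-an-escape recursions (their pattern overlap means
-- `simp [f]` alone cannot apply them; proved once from `.eq_def`)
theorem usetB_bs (x : Char) (rest' : List Char) (acc : PySem.Set Char) :
    usetB ('\\' :: x :: rest') acc = usetB rest' acc := by
  rw [usetB.eq_def]; simp

theorem usetB_plain (c : Char) (rest : List Char) (acc : PySem.Set Char) (h : ¬ c = '\\') :
    usetB (c :: rest) acc = usetB rest (acc.add c) := by
  rw [usetB.eq_def]; simp [h]

theorem fuA_bs (d : List Char) (x : Char) (rest' : List Char) (i : Nat) :
    fuA d ('\\' :: x :: rest') i = fuA d rest' (i + 2) := by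
  rw [fuA.eq_def]; simp

theorem fuA_hit (d : List Char) (c : Char) (rest : List Char) (i : Nat)
    (h : ¬ c = '\\') (hc : [c] = d) : fuA d (c :: rest) i = i :: fuA d rest (i + 1) := by
  rw [fuA.eq_def]; simp [h, hc]

theorem fuA_miss (d : List Char) (c : Char) (rest : List Char) (i : Nat)
    (h : ¬ c = '\\') (hc : ¬ [c] = d) : fuA d (c :: rest) i = fuA d rest (i + 1) := by
  rw [fuA.eq_def]; simp [h, hc]

theorem rebuildB_bs (d : List Char) (x : Char) (rest' : List Char) :
    rebuildB d ('\\' :: x :: rest') = '\\' :: x :: rebuildB d rest' := by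
  rw [rebuildB.eq_def]; simp

theorem rebuildB_hit (d : List Char) (c : Char) (rest : List Char)
    (h : ¬ c = '\\') (hc : [c] = d) :
    rebuildB d (c :: rest) = ('\\' :: d) ++ rebuildB d rest := by
  rw [rebuildB.eq_def]; simp [h, hc]

theorem rebuildB_miss (d : List Char) (c : Char) (rest : List Char)
    (h : ¬ c = '\\') (hc : ¬ [c] = d) :
    rebuildB d (c :: rest) = c :: rebuildB d rest := by
  rw [rebuildB.eq_def]; simp [h, hc]

-- single characters are in the unescaped-set iff find_unescaped yields something
theorem mem_usetB_iff (c : Char) : ∀ (l : List Char) (acc : PySem.Set Char),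
    (∀ i : Nat, (c ∈ usetB l acc ↔ c ∈ acc ∨ fuA [c] l i ≠ [])) := by
  intro l acc
  induction l, acc using usetB.induct with
  | case1 acc => intro i; simp [usetB, fuA]
  | case2 acc => intro i; simp [usetB, fuA]
  | case3 acc x rest' ih =>
      intro i
      rw [usetB_bs, fuA_bs]
      exact ih (i + 2)
  | case4 c' rest acc h ih =>
      intro i
      rw [usetB_plain c' rest acc h]
      by_cases hc : c' = c
      · subst hc
        rw [fuA_hit [c'] c' rest i h rfl]
        rw [ih (i + 1), PySem.Set.mem_add]
        simp
      · have hne : ¬([c'] = [c]) := by simp [hc]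
        rw [fuA_miss [c] c' rest i h hne]
        rw [ih (i + 1), PySem.Set.mem_add]
        have : ¬(c = c') := fun h' => hc h'.symm
        simp [this]

-- candidates that are not a single character never match c2 == c, so find_unescaped is empty
theorem fuA_not_single (d : List Char) (l : List Char) (i : Nat)
    (hd : ∀ c : Char, d ≠ [c]) : fuA d l i = [] := by
  induction l, i using fuA.induct (c := d) with
  | case1 x => simp [fuA]
  | case2 i => simp [fuA]
  | case3 i x rest' ih => rw [fuA_bs]; exact ih
  | case4 c2 rest i h hc ih => exact absurd hc.symm (hd c2)
  | case5 c2 rest i h hc ih => rw [fuA_miss d c2 rest i h hc]; exact ih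

-- the candidate-emptiness test of A equals B's set-membership test
theorem fu_empty_iff_memb (sl : List Char) (ch : String) :
    (fuA ch.toList sl 0 = []) ↔ membB (usetB sl PySem.Set.empty) ch = false := by
  match h : ch.toList with
  | [c] =>
      have hmb : membB (usetB sl PySem.Set.empty) ch
          = (usetB sl PySem.Set.empty).contains c := by
        unfold membB; rw [h]
      have hm : (usetB sl PySem.Set.empty).contains c = true ↔ fuA [c] sl 0 ≠ [] := by
        rw [PySem.Set.contains_iff, mem_usetB_iff c sl PySem.Set.empty 0]
        simp [PySem.Set.empty]
      rw [hmb]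
      cases hcb : (usetB sl PySem.Set.empty).contains c
      · rw [hcb] at hm
        simp at hm
        simp [hm]
      · rw [hcb] at hm
        simp at hm
        simp [hm]
  | [] =>
      have := fuA_not_single [] sl 0 (by simp)
      simp [membB, h, this]
  | c1 :: c2 :: rest =>
      have := fuA_not_single (c1 :: c2 :: rest) sl 0 (by simp)
      simp [membB, h, this]

-- the two delimiter searches agree
theorem fud_eq_find (sl : List Char) : ∀ chars : List String,
    fudA sl chars = findB (usetB sl PySem.Set.empty) chars := by
  intro chars
  induction chars with
  | nil => rfl
  | cons ch rest ih =>
      simp only [fudA, findB]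
      by_cases h : fuA ch.toList sl 0 = []
      · rw [if_pos h, (fu_empty_iff_memb sl ch).mp h]
        simp
      · have hm : membB (usetB sl PySem.Set.empty) ch = true := by
          cases hb : membB (usetB sl PySem.Set.empty) ch
          · exact absurd ((fu_empty_iff_memb sl ch).mpr hb) h
          · rfl
        rw [if_neg h, hm, ih]
        simp

-- the right-to-left splicing loop over find_unescaped's indices equals the single rebuilding pass
theorem splice_eq_rebuild (d : List Char) : ∀ (l : List Char) (i : Nat), ∀ (pre : List Char),
    pre.length = i →
    (fuA d l i).foldr
      (fun idx t => PySem.List.slice t none (some ((idx : Nat) : Int)) ++ ('\\' :: d)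
        ++ PySem.List.slice t (some (((idx : Nat) : Int) + 1)) none) (pre ++ l)
      = pre ++ rebuildB d l := by
  intro l i
  induction l, i using fuA.induct (c := d) with
  | case1 x => intro pre hi; simp [fuA, rebuildB]
  | case2 i => intro pre hi; simp [fuA, rebuildB]
  | case3 i x rest' ih =>
      intro pre hi
      rw [fuA_bs, rebuildB_bs]
      have h2 : (pre ++ ['\\', x]).length = i + 2 := by simp [hi]
      have hrw : pre ++ '\\' :: x :: rest' = (pre ++ ['\\', x]) ++ rest' := by simp
      rw [hrw, ih (pre ++ ['\\', x]) h2]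
      simp
  | case4 c2 rest i h hc ih =>
      intro pre hi
      rw [fuA_hit d c2 rest i h hc, rebuildB_hit d c2 rest h hc, List.foldr_cons]
      have h1 : (pre ++ [c2]).length = i + 1 := by simp [hi]
      have hrw : pre ++ c2 :: rest = (pre ++ [c2]) ++ rest := by simp
      rw [hrw, ih (pre ++ [c2]) h1]
      have hcast : ((i : Int) + 1) = ((i + 1 : Nat) : Int) := by push_cast; ring
      rw [hcast, PySem.List.slice_to_natCast, PySem.List.slice_from_natCast]
      have hlen : i + 1 = (pre ++ [c2]).length := by simp [hi]
      rw [hlen, List.drop_left, ← hi]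
      simp
  | case5 c2 rest i h hc ih =>
      intro pre hi
      rw [fuA_miss d c2 rest i h hc, rebuildB_miss d c2 rest h hc]
      have h1 : (pre ++ [c2]).length = i + 1 := by simp [hi]
      have hrw : pre ++ c2 :: rest = (pre ++ [c2]) ++ rest := by simp
      rw [hrw, ih (pre ++ [c2]) h1]
      simp

-- specialisation to the actual starting state (empty prefix, index 0)
theorem splice_eq_rebuild0 (d l : List Char) :
    (fuA d l 0).foldr
      (fun idx t => PySem.List.slice t none (some ((idx : Nat) : Int)) ++ ('\\' :: d)
        ++ PySem.List.slice t (some (((idx : Nat) : Int) + 1)) none) l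
      = rebuildB d l := by
  simpa using splice_eq_rebuild d l 0 [] rfl

-- the whole fallback branches agree
theorem fbA_eq_fbB (s : String) (chars : List String) : fbA s chars = fbB s chars := by
  simp only [fbA, fbB, List.foldl_reverse]
  rw [splice_eq_rebuild0]

-- ===== VERDICT (by name: the statement is the Claim_ definition above) =====
theorem with_delimiter_spec : Claim_equal_with_delimiter := by
  intro s chars _ _
  unfold Spec_with_delimiter with_delimiter with_delimiter_alt
  rw [fud_eq_find s.toList chars]
  cases findB (usetB s.toList PySem.Set.empty) chars with
  | none => exact fbA_eq_fbB s chars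
  | some d =>
      by_cases h : d.toList = []
      · simp [h, fbA_eq_fbB]
      · simp [h]
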